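-- pv_equiv track=rewrite | github.com/DarthJahus/tools-fitness | fit_cardio.py | create_zone_dict
-- ===== SOURCE A (Python) =====
-- def create_zone_dict(zone_boundaries, user_max_hr=None, data_max_hr=None):
--     """
--     Create zone dictionary from boundaries.
--
--     Args:
--         zone_boundaries: List of 5 upper boundaries [z1, z2, z3, z4, z5]
--         user_max_hr: Max HR specified by user (for auto-calculated zones)
--         data_max_hr: Max HR from actual dataset (for manual zones)
--
--     Returns:
--         Dictionary with zone definitions
--
--     Zone structure (non-overlapping):
--         Zone 0: 0 to boundary[0]
--         Zone 1: boundary[0]+1 to boundary[1]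
--         Zone 2: boundary[1]+1 to boundary[2]
--         Zone 3: boundary[2]+1 to boundary[3]
--         Zone 4: boundary[3]+1 to boundary[4]
--         Zone 5: boundary[4]+1 to upper_limit
--
--     Upper limit for zone 5:
--         - If user_max_hr provided: use that value
--         - Otherwise: max(data_max_hr, zone5_start) + 10 for visual padding
--     """
--     colors = ["lightgrey", "lightblue", "green", "orange", "red", "purple"]
--     zones = {}
--
--     # Calculate upper limit for zone 5
--     zone5_start = zone_boundaries[4] + 1
--     if user_max_hr is not None:
--         zone5_upper = user_max_hr
--     else:
--         # Use data max or zone start, whichever is higher, plus 10 for visual padding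
--         zone5_upper = max(data_max_hr if data_max_hr else zone5_start, zone5_start) + 10
--
--     # Zone 0: Recovery/Warmup (0 to first boundary, inclusive)
--     zones[f"Zone 0 (0-{zone_boundaries[0]})"] = (0, zone_boundaries[0], colors[0])
--
--     # Zones 1-4: Between boundaries (non-overlapping)
--     for i in range(len(zone_boundaries) - 1):
--         low = zone_boundaries[i] + 1
--         high = zone_boundaries[i + 1]
--         zones[f"Zone {i+1} ({low}-{high})"] = (
--             low,
--             high,
--             colors[i+1]
--         )
--
--     # Zone 5: Maximum (last boundary + 1 and above)
--     if user_max_hr is not None: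
--         zones[f"Zone 5 ({zone5_start}-{zone5_upper})"] = (zone5_start, zone5_upper, colors[5])
--     else:
--         zones[f"Zone 5 ({zone5_start}+)"] = (zone5_start, zone5_upper, colors[5])
--
--     return zones
-- ===== SOURCE B (Python) =====
-- def create_zone_dict(zone_boundaries, user_max_hr=None, data_max_hr=None):
--     colors = ["lightgrey", "lightblue", "green", "orange", "red", "purple"]
--     zone5_start = zone_boundaries[4] + 1
--     if user_max_hr is not None:
--         zone5_upper = user_max_hr
--     else:
--         zone5_upper = max(data_max_hr if data_max_hr else zone5_start, zone5_start) + 10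
--     ext = [-1] + list(zone_boundaries) + [zone5_upper]
--     zones = {}
--     for i in range(6):
--         low = ext[i] + 1
--         high = ext[i + 1]
--         if i == 5 and user_max_hr is None:
--             label = f"Zone 5 ({low}+)"
--         else:
--             label = f"Zone {i} ({low}-{high})"
--         zones[label] = (low, high, colors[i])
--     return zones
-- ===== Notes on version B (the rewrite author's own statement) =====
-- stated objective: simpler
-- what changed: Replaces A's three separate code paths (a special-cased zone 0, a loop over interior boundary pairs, and a special-cased zone 5) with a single uniform pass over an extended boundary list [-1] + boundaries + [zone5_upper], deriving every zone's low/high/label/color from one index.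
-- outside the precondition, e.g. on create_zone_dict([-1], None, None): A raises IndexError, B raises IndexError
import Mathlib
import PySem

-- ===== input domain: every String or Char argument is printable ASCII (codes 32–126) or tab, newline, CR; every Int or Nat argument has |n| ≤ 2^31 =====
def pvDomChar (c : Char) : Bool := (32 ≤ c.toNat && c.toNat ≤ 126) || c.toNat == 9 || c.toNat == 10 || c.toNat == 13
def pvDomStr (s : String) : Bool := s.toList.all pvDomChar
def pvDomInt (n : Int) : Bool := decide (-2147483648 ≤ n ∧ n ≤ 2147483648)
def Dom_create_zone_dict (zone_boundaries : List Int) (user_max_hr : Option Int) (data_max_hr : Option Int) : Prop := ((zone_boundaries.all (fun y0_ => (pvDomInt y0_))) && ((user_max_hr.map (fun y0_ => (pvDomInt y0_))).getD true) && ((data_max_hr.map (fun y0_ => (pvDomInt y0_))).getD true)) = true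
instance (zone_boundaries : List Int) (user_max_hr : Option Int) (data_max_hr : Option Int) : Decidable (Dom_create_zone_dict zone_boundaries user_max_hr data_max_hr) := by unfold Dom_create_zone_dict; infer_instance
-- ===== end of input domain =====

-- B replaces A's three separate code paths (special-cased zone 0, a loop over interior
-- boundaries, special-cased zone 5) with one uniform pass over an extended boundary list;
-- objective: simpler (same cost — the zone count is fixed).

-- ===== PORT A =====
def create_zone_dict (zone_boundaries : List Int) (user_max_hr : Option Int) (data_max_hr : Option Int) : List (String × Int × Int × String) :=
  let colors : List String := ["lightgrey", "lightblue", "green", "orange", "red", "purple"]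
  let zone5_start : Int := PySem.List.pyGetD zone_boundaries 4 0 + 1
  let zone5_upper : Int :=
    match user_max_hr with
    | some m => m
    | none => (max (match data_max_hr with | some dm => if dm == 0 then zone5_start else dm | none => zone5_start) zone5_start) + 10
  let zones : PySem.Dict String (Int × Int × String) := PySem.Dict.empty
  let b0 : Int := PySem.List.pyGetD zone_boundaries 0 0
  let zones := zones.insert ("Zone 0 (0-" ++ PySem.Int.toStr b0 ++ ")") (0, b0, PySem.List.pyGetD colors 0 "")
  let zones := (PySem.List.pyRange 0 (PySem.List.len zone_boundaries - 1) 1).foldl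
    (fun zones i =>
      let low := PySem.List.pyGetD zone_boundaries i 0 + 1
      let high := PySem.List.pyGetD zone_boundaries (i + 1) 0
      zones.insert ("Zone " ++ PySem.Int.toStr (i + 1) ++ " (" ++ PySem.Int.toStr low ++ "-" ++ PySem.Int.toStr high ++ ")")
        (low, high, PySem.List.pyGetD colors (i + 1) "")) zones
  let zones :=
    match user_max_hr with
    | some _ => zones.insert ("Zone 5 (" ++ PySem.Int.toStr zone5_start ++ "-" ++ PySem.Int.toStr zone5_upper ++ ")") (zone5_start, zone5_upper, PySem.List.pyGetD colors 5 "")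
    | none => zones.insert ("Zone 5 (" ++ PySem.Int.toStr zone5_start ++ "+)") (zone5_start, zone5_upper, PySem.List.pyGetD colors 5 "")
  zones.items

-- ===== PORT B =====
def create_zone_dict_alt (zone_boundaries : List Int) (user_max_hr : Option Int) (data_max_hr : Option Int) : List (String × Int × Int × String) :=
  let colors : List String := ["lightgrey", "lightblue", "green", "orange", "red", "purple"]
  let zone5_start : Int := PySem.List.pyGetD zone_boundaries 4 0 + 1
  let zone5_upper : Int :=
    match user_max_hr with
    | some m => m
    | none => (max (match data_max_hr with | some dm => if dm == 0 then zone5_start else dm | none => zone5_start) zone5_start) + 10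
  let ext : List Int := [-1] ++ zone_boundaries ++ [zone5_upper]
  let zones := (PySem.List.pyRange 0 6 1).foldl
    (fun zones (i : Int) =>
      let low := PySem.List.pyGetD ext i 0 + 1
      let high := PySem.List.pyGetD ext (i + 1) 0
      let label := if i == 5 && user_max_hr.isNone
        then "Zone 5 (" ++ PySem.Int.toStr low ++ "+)"
        else "Zone " ++ PySem.Int.toStr i ++ " (" ++ PySem.Int.toStr low ++ "-" ++ PySem.Int.toStr high ++ ")"
      zones.insert label (low, high, PySem.List.pyGetD colors i "")) (PySem.Dict.empty : PySem.Dict String (Int × Int × String))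
  zones.items

-- ===== PRECONDITION & SPEC =====
-- Pre_ restricts to the documented 5-boundary shape: A raises IndexError for fewer than 5
-- or more than 6 boundaries, and on exactly 6 boundaries the corner is unspecified and both
-- values are defensible (A emits an extra interior zone from its loop as well as its closing
-- 'Zone 5' entry; B keeps six zones and ignores the extra boundary).
def Pre_create_zone_dict (zone_boundaries : List Int) (user_max_hr : Option Int) (data_max_hr : Option Int) : Prop :=
  zone_boundaries.length = 5
instance (zone_boundaries : List Int) (user_max_hr : Option Int) (data_max_hr : Option Int) : Decidable (Pre_create_zone_dict zone_boundaries user_max_hr data_max_hr) := by unfold Pre_create_zone_dict; infer_instance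

def pvWitness_create_zone_dict : List Int × Option Int × Option Int := ([114, 133, 152, 171, 190], none, some 187)

def Spec_create_zone_dict (zone_boundaries : List Int) (user_max_hr : Option Int) (data_max_hr : Option Int) (out : List (String × Int × Int × String)) : Prop := out = create_zone_dict_alt zone_boundaries user_max_hr data_max_hr
instance (zone_boundaries : List Int) (user_max_hr : Option Int) (data_max_hr : Option Int) (out : List (String × Int × Int × String)) : Decidable (Spec_create_zone_dict zone_boundaries user_max_hr data_max_hr out) := by unfold Spec_create_zone_dict; infer_instance

-- ===== CLAIM (what is proved, stated in full; the proofs are below) =====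
def Claim_equal_create_zone_dict : Prop := ∀ (zone_boundaries : List Int) (user_max_hr : Option Int) (data_max_hr : Option Int), Dom_create_zone_dict zone_boundaries user_max_hr data_max_hr → Pre_create_zone_dict zone_boundaries user_max_hr data_max_hr → Spec_create_zone_dict zone_boundaries user_max_hr data_max_hr (create_zone_dict zone_boundaries user_max_hr data_max_hr)

-- ===== LEMMAS AND PROOFS =====
lemma pvLen5 (a b c d e : Int) : PySem.List.len [a,b,c,d,e] - 1 = 4 := rfl
lemma pvRange4 : PySem.List.pyRange 0 4 1 = [0,1,2,3] := rfl
lemma pvRange6 : PySem.List.pyRange 0 6 1 = [0,1,2,3,4,5] := rfl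

lemma pvGetA0 (a b c d e : Int) : PySem.List.pyGetD [a,b,c,d,e] 0 0 = a := rfl
lemma pvGetA1 (a b c d e : Int) : PySem.List.pyGetD [a,b,c,d,e] 1 0 = b := rfl
lemma pvGetA2 (a b c d e : Int) : PySem.List.pyGetD [a,b,c,d,e] 2 0 = c := rfl
lemma pvGetA3 (a b c d e : Int) : PySem.List.pyGetD [a,b,c,d,e] 3 0 = d := rfl
lemma pvGetA4 (a b c d e : Int) : PySem.List.pyGetD [a,b,c,d,e] 4 0 = e := rfl

lemma pvGetB0 (a b c d e z : Int) : PySem.List.pyGetD [-1,a,b,c,d,e,z] 0 0 = -1 := rfl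
lemma pvGetB1 (a b c d e z : Int) : PySem.List.pyGetD [-1,a,b,c,d,e,z] 1 0 = a := rfl
lemma pvGetB2 (a b c d e z : Int) : PySem.List.pyGetD [-1,a,b,c,d,e,z] 2 0 = b := rfl
lemma pvGetB3 (a b c d e z : Int) : PySem.List.pyGetD [-1,a,b,c,d,e,z] 3 0 = c := rfl
lemma pvGetB4 (a b c d e z : Int) : PySem.List.pyGetD [-1,a,b,c,d,e,z] 4 0 = d := rfl
lemma pvGetB5 (a b c d e z : Int) : PySem.List.pyGetD [-1,a,b,c,d,e,z] 5 0 = e := rfl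
lemma pvGetB6 (a b c d e z : Int) : PySem.List.pyGetD [-1,a,b,c,d,e,z] 6 0 = z := rfl

lemma pvC0 : PySem.List.pyGetD ["lightgrey","lightblue","green","orange","red","purple"] 0 "" = "lightgrey" := rfl
lemma pvC1 : PySem.List.pyGetD ["lightgrey","lightblue","green","orange","red","purple"] 1 "" = "lightblue" := rfl
lemma pvC2 : PySem.List.pyGetD ["lightgrey","lightblue","green","orange","red","purple"] 2 "" = "green" := rfl
lemma pvC3 : PySem.List.pyGetD ["lightgrey","lightblue","green","orange","red","purple"] 3 "" = "orange" := rfl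
lemma pvC4 : PySem.List.pyGetD ["lightgrey","lightblue","green","orange","red","purple"] 4 "" = "red" := rfl
lemma pvC5 : PySem.List.pyGetD ["lightgrey","lightblue","green","orange","red","purple"] 5 "" = "purple" := rfl

lemma pvT0 : PySem.Int.toStr 0 = "0" := rfl
lemma pvT1 : PySem.Int.toStr 1 = "1" := rfl
lemma pvT2 : PySem.Int.toStr 2 = "2" := rfl
lemma pvT3 : PySem.Int.toStr 3 = "3" := rfl
lemma pvT4 : PySem.Int.toStr 4 = "4" := rfl
lemma pvT5 : PySem.Int.toStr 5 = "5" := rfl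

lemma pvB0 : ((0 : Int) == 5) = false := rfl
lemma pvB1 : ((1 : Int) == 5) = false := rfl
lemma pvB2 : ((2 : Int) == 5) = false := rfl
lemma pvB3 : ((3 : Int) == 5) = false := rfl
lemma pvB4 : ((4 : Int) == 5) = false := rfl
lemma pvB5 : ((5 : Int) == 5) = true := rfl

-- ===== VERDICT (by name: the statement is the Claim_ definition above) =====
set_option maxHeartbeats 1000000 in
theorem create_zone_dict_spec : Claim_equal_create_zone_dict := by
  intro zb u dm _hdom hpre
  unfold Pre_create_zone_dict at hpre
  unfold Spec_create_zone_dict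
  rcases zb with _ | ⟨a, zb⟩; · simp at hpre
  rcases zb with _ | ⟨b, zb⟩; · simp at hpre
  rcases zb with _ | ⟨c, zb⟩; · simp at hpre
  rcases zb with _ | ⟨d, zb⟩; · simp at hpre
  rcases zb with _ | ⟨e, zb⟩; · simp at hpre
  rcases zb with _ | ⟨f, zb⟩
  case cons.cons.cons.cons.cons.cons =>
    exfalso
    simp only [List.length_cons] at hpre
    omega
  cases u <;>
    simp only [create_zone_dict, create_zone_dict_alt,
      List.cons_append, List.nil_append,
      pvLen5, pvRange4, pvRange6,
      List.foldl_cons, List.foldl_nil,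
      Int.reduceAdd,
      pvGetA0, pvGetA1, pvGetA2, pvGetA3, pvGetA4,
      pvGetB0, pvGetB1, pvGetB2, pvGetB3, pvGetB4, pvGetB5, pvGetB6,
      pvC0, pvC1, pvC2, pvC3, pvC4, pvC5,
      pvT0, pvT1, pvT2, pvT3, pvT4, pvT5,
      pvB0, pvB1, pvB2, pvB3, pvB4, pvB5,
      Option.isNone_none, Option.isNone_some,
      Bool.and_true, Bool.and_false,
      Bool.false_eq_true, if_false, if_true,
      String.reduceAppend]
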